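-- pv_equiv track=rewrite | github.com/lixarcapto/test_projects | asp_2025/on_work/bld_1/src/basic/core/app/task/logic/WriteStringMatrixAsColumnsTK.py | inner
-- ===== SOURCE A (Python) =====
-- def inner(matrixArray):
--     text = ""
--     spaces = " " * 5
--     quantityColumns = 3
--     counterColumns = 0
--     for y in range(len(matrixArray)):
--         for i in range(len(matrixArray[y])):
--             text += matrixArray[y][i]
--             if(counterColumns == quantityColumns):
--                 counterColumns = 0
--                 text += "\n"
--             else:
--                 text += spaces
--                 counterColumns += 1
--     return text
-- ===== SOURCE B (Python) =====
-- def inner(matrixArray):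
--     # Stage 1: flatten; Stage 2: chunk into groups of 4; Stage 3: render each
--     # group as a separator-joined line (full groups end with '\n', the final
--     # partial group keeps a trailing separator) and concatenate.
--     flat = [s for row in matrixArray for s in row]
--     sp = " " * 5
--     pieces = []
--     for j in range(0, len(flat), 4):
--         group = flat[j:j + 4]
--         pieces.append(sp.join(group) + ("\n" if len(group) == 4 else sp))
--     return "".join(pieces)
-- ===== Notes on version B (the rewrite author's own statement) =====
-- stated objective: simpler
-- what changed: Replaces the nested loops with a mutable running column counter by a staged pipeline: flatten, chunk the flat list into groups of 4, render each group as a separator-joined line (full groups terminated by a newline, the last partial group by a trailing separator) and concatenate.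
import Mathlib
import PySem

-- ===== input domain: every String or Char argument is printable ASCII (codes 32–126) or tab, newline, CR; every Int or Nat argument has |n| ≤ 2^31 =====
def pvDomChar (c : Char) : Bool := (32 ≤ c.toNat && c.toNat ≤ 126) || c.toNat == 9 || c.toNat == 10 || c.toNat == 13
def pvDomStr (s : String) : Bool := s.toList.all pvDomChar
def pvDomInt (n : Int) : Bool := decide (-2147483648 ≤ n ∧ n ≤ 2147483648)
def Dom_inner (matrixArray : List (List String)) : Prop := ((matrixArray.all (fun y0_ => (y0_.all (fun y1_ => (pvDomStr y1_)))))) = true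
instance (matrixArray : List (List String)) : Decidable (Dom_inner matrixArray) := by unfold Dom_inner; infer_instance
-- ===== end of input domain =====

-- B restates A's per-element running-counter loop as a staged pipeline (flatten, chunk
-- into groups of 4, render groups, concatenate); objective: simpler decomposition.

-- ===== PORT A =====
-- Nested loops over rows and elements, accumulating (text, counterColumns); newline when
-- the running counter reaches quantityColumns = 3, else five spaces; counter is global.
def innerStep (s : String × Nat) (x : String) : String × Nat :=
  let t := s.1 ++ x
  if s.2 == 3 then (t ++ "\n", 0) else (t ++ "     ", s.2 + 1)

def inner (matrixArray : List (List String)) : String :=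
  (matrixArray.foldl (fun s row => row.foldl innerStep s) ("", 0)).1

-- ===== PORT B =====
-- B: flatten row-major, chunk into groups of 4, render each group as sp.join(group)
-- plus "\n" (full group) or a trailing separator (last partial group), concatenate.
def chunk4 (l : List String) : List (List String) :=
  match l with
  | [] => []
  | x :: xs => (x :: xs.take 3) :: chunk4 (xs.drop 3)
termination_by l.length
decreasing_by simp

def sepJoin : List String → String
  | [] => ""
  | [x] => x
  | x :: y :: xs => x ++ "     " ++ sepJoin (y :: xs)

def groupOut (g : List String) : String :=
  sepJoin g ++ (if g.length == 4 then "\n" else "     ")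

def inner_alt (matrixArray : List (List String)) : String :=
  String.join ((chunk4 (matrixArray.flatMap id)).map groupOut)

-- ===== PRECONDITION & SPEC =====
def Spec_inner (matrixArray : List (List String)) (out : String) : Prop := out = inner_alt matrixArray
instance (matrixArray : List (List String)) (out : String) : Decidable (Spec_inner matrixArray out) := by unfold Spec_inner; infer_instance

-- ===== CLAIM (what is proved, stated in full; the proofs are below) =====
def Claim_equal_inner : Prop := ∀ (matrixArray : List (List String)), Dom_inner matrixArray → Spec_inner matrixArray (inner matrixArray)

-- ===== LEMMAS AND PROOFS =====

lemma pvFoldlAppend (l : List String) (s r : String) :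
    l.foldl (fun r s => r ++ s) (s ++ r) = s ++ l.foldl (fun r s => r ++ s) r := by
  induction l generalizing r with
  | nil => simp
  | cons a l ih => rw [List.foldl_cons, List.foldl_cons, String.append_assoc, ih]

lemma pvJoinCons (a : String) (l : List String) :
    String.join (a :: l) = a ++ String.join l := by
  show (a :: l).foldl (fun r s => r ++ s) "" = a ++ l.foldl (fun r s => r ++ s) ""
  rw [List.foldl_cons, String.empty_append]
  have h := pvFoldlAppend l a ""
  rwa [String.append_empty] at h

lemma pvJoinNil : String.join ([] : List String) = "" := rfl

lemma foldA (l : List String) (t : String) :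
    l.foldl innerStep (t, 0)
      = (t ++ String.join ((chunk4 l).map groupOut), l.length % 4) := by
  induction hn : l.length using Nat.strong_induction_on generalizing l t with
  | _ n ih =>
  rcases l with _ | ⟨x, xs⟩
  · subst hn
    simp [chunk4, pvJoinNil, String.append_empty]
  rcases xs with _ | ⟨b, _ | ⟨c, _ | ⟨d, rest⟩⟩⟩
  · subst hn
    simp [chunk4, innerStep, groupOut, sepJoin, pvJoinCons, pvJoinNil, String.append_assoc, String.append_empty]
  · subst hn
    simp [chunk4, innerStep, groupOut, sepJoin, pvJoinCons, pvJoinNil, String.append_assoc, String.append_empty]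
  · subst hn
    simp [chunk4, innerStep, groupOut, sepJoin, pvJoinCons, pvJoinNil, String.append_assoc, String.append_empty]
  · have h4 : (x :: b :: c :: d :: rest).foldl innerStep (t, 0)
        = rest.foldl innerStep (t ++ x ++ "     " ++ b ++ "     " ++ c ++ "     " ++ d ++ "\n", 0) := by
      simp [innerStep]
    rw [h4, ih rest.length (by simp at hn; omega) rest _ rfl]
    have hc : chunk4 (x :: b :: c :: d :: rest) = [x, b, c, d] :: chunk4 rest := by
      rw [chunk4]; simp
    rw [hc, List.map_cons, pvJoinCons, Prod.mk.injEq]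
    constructor
    · simp [groupOut, sepJoin, String.append_assoc]
    · simp at hn ⊢; omega

lemma foldl_rows_eq_flat (m : List (List String)) (s : String × Nat) :
    m.foldl (fun s row => row.foldl innerStep s) s = (m.flatMap id).foldl innerStep s := by
  induction m generalizing s with
  | nil => simp
  | cons r m ih => simp [List.foldl_append, ih]

-- ===== VERDICT (by name: the statement is the Claim_ definition above) =====
theorem inner_spec : Claim_equal_inner := by
  intro m _
  unfold Spec_inner _root_.inner inner_alt
  rw [foldl_rows_eq_flat, foldA]
  simp [String.empty_append]
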